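-- pv_equiv track=rewrite | github.com/WypeBoard/AdventOfCode18 | AdventOfCode18/Day2/DayTwo.py | partone
-- ===== SOURCE A (Python) =====
-- def partone(data):
--     two = 0
--     three = 0
--     for string in data:
--         checked = []
--         checkTwo = False
--         checkThree = False
--         for char in string:
--             if char in checked:
--                 continue
--             i = string.count(char)
--             if i == 2 and not checkTwo:
--                 checked.append(char)
--                 checkTwo = True
--                 two = two + 1
--             elif i == 3 and not checkThree:
--                 checked.append(char)
--                 checkThree = True
--                 three = three + 1
--     return two * three
-- ===== SOURCE B (Python) =====
-- def partone(data):
--     two = 0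
--     three = 0
--     for s in data:
--         chars = sorted(s)
--         n = len(chars)
--         has_two = False
--         has_three = False
--         i = 0
--         while i < n:
--             j = i
--             while j < n and chars[j] == chars[i]:
--                 j += 1
--             run = j - i
--             if run == 2:
--                 has_two = True
--             elif run == 3:
--                 has_three = True
--             i = j
--         if has_two:
--             two += 1
--         if has_three:
--             three += 1
--     return two * three
-- ===== Notes on version B (the rewrite author's own statement) =====
-- stated objective: alternative
-- what changed: Per string, instead of repeatedly rescanning the whole string with string.count for each character while maintaining a 'checked' list, B sorts the characters once and walks the sorted sequence with a two-pointer run scan, setting has_two/has_three from the run lengths.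
import Mathlib
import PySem

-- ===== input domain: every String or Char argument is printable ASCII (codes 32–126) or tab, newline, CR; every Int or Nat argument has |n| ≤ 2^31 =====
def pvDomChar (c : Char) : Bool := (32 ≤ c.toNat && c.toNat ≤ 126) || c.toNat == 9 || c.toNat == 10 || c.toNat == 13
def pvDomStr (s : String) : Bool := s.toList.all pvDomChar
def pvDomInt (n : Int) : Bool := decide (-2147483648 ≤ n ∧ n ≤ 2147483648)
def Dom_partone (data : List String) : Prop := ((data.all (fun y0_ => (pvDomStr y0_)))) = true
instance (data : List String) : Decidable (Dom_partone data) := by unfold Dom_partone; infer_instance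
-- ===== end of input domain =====

-- B replaces A's per-character whole-string rescans (string.count + a 'checked' list)
-- by sorting each string once and scanning runs of equal characters; alternative decomposition.

-- ===== PORT A =====
-- inner loop body of A: state (checked, checkTwo, checkThree, two, three)
def parteoneStep (s : String) (st : List Char × Bool × Bool × Int × Int) (char : Char) :
    List Char × Bool × Bool × Int × Int :=
  let (checked, checkTwo, checkThree, two, three) := st
  if checked.contains char then st
  else
    -- string.count(char) for a 1-character pattern
    let i := PySem.Str.count s (String.singleton char)
    if i = 2 ∧ checkTwo = false then (checked ++ [char], true, checkThree, two + 1, three)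
    else if i = 3 ∧ checkThree = false then (checked ++ [char], checkTwo, true, two, three + 1)
    else st

def partone (data : List String) : Int :=
  let st := data.foldl (fun (acc : Int × Int) s =>
    let r := s.toList.foldl (parteoneStep s) ([], false, false, acc.1, acc.2)
    (r.2.2.2.1, r.2.2.2.2)) (0, 0)
  st.1 * st.2

-- ===== PORT B =====
-- the nested while loops of B: lengths of the successive runs of equal chars
def runLengths : List Char → List Nat
  | [] => []
  | c :: rest =>
      (1 + (rest.takeWhile (· == c)).length) :: runLengths (rest.dropWhile (· == c))
termination_by l => l.length
decreasing_by
  simp only [List.length_cons]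
  exact Nat.lt_succ_of_le (List.length_dropWhile_le _ _)

def partone_alt (data : List String) : Int :=
  let st := data.foldl (fun (acc : Int × Int) s =>
    let chars := PySem.List.sorted s.toList (fun x => x) false
    let flags := (runLengths chars).foldl
      (fun (f : Bool × Bool) run =>
        if run = 2 then (true, f.2) else if run = 3 then (f.1, true) else f)
      (false, false)
    ((if flags.1 then acc.1 + 1 else acc.1), (if flags.2 then acc.2 + 1 else acc.2))) (0, 0)
  st.1 * st.2

-- ===== PRECONDITION & SPEC =====
def Spec_partone (data : List String) (out : Int) : Prop := out = partone_alt data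
instance (data : List String) (out : Int) : Decidable (Spec_partone data out) := by unfold Spec_partone; infer_instance

-- ===== CLAIM (what is proved, stated in full; the proofs are below) =====
def Claim_equal_partone : Prop := ∀ (data : List String), Dom_partone data → Spec_partone data (partone data)

-- ===== LEMMAS AND PROOFS =====

-- string.count with a single-character pattern is the character count
theorem chars_count_go_singleton (c : Char) :
    ∀ (l : List Char) (fuel acc : Nat), l.length ≤ fuel →
      PySem.Chars.count.go [c] fuel l acc = acc + l.count c := by
  intro l
  induction l with
  | nil =>
      intro fuel acc _
      cases fuel <;> simp [PySem.Chars.count.go]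
  | cons h t ih =>
      intro fuel acc hf
      cases fuel with
      | zero => simp at hf
      | succ fuel =>
        have hle : t.length ≤ fuel := by simpa using hf
        by_cases hc : c = h
        · subst hc
          simp [PySem.Chars.count.go, List.isPrefixOf, ih _ _ hle]
          omega
        · have : ([c].isPrefixOf (h :: t)) = false := by
            simp [List.isPrefixOf]
            exact fun habs => hc (by simpa using habs)
          simp [PySem.Chars.count.go, this, ih _ _ hle, List.count_cons]
          intro habs; exact absurd habs.symm hc

theorem chars_count_singleton (l : List Char) (c : Char) :
    PySem.Chars.count l [c] = l.count c := by
  simp only [PySem.Chars.count]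
  simp only [List.isEmpty, if_neg (by simp : ¬((false : Bool) = true))]
  rw [chars_count_go_singleton c l l.length 0 (le_refl _)]
  simp

-- the per-string delta on the counters
def delta' (S r : List Char) (n : Nat) : Int :=
  if ∃ c ∈ r, S.count c = n then 1 else 0

-- delta' facts
theorem delta'_nil (S : List Char) (n : Nat) : delta' S [] n = 0 := by
  simp [delta']

theorem delta'_cons_eq (S : List Char) (c : Char) (r : List Char) (n : Nat)
    (h : S.count c = n) : delta' S (c :: r) n = 1 := by
  unfold delta'
  exact if_pos ⟨c, List.mem_cons_self, h⟩

theorem delta'_cons_ne (S : List Char) (c : Char) (r : List Char) (n : Nat)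
    (h : S.count c ≠ n) : delta' S (c :: r) n = delta' S r n := by
  have hiff : (∃ x ∈ c :: r, S.count x = n) ↔ (∃ x ∈ r, S.count x = n) := by
    constructor
    · rintro ⟨x, hx, hxc⟩
      rcases List.mem_cons.1 hx with rfl | hx'
      · exact absurd hxc h
      · exact ⟨x, hx', hxc⟩
    · rintro ⟨x, hx, hxc⟩
      exact ⟨x, List.mem_cons_of_mem _ hx, hxc⟩
  simp only [delta', hiff]

theorem partone_inner (s : String) :
    ∀ (r checked : List Char) (cT cTh : Bool) (two three : Int),
      (∀ c ∈ checked, s.toList.count c = 2 ∨ s.toList.count c = 3) →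
      (cT = true ↔ ∃ c ∈ checked, s.toList.count c = 2) →
      (cTh = true ↔ ∃ c ∈ checked, s.toList.count c = 3) →
      (r.foldl (parteoneStep s) (checked, cT, cTh, two, three)).2.2.2.1
          = two + (if cT then 0 else delta' s.toList r 2) ∧
      (r.foldl (parteoneStep s) (checked, cT, cTh, two, three)).2.2.2.2
          = three + (if cTh then 0 else delta' s.toList r 3) := by
  intro r
  induction r with
  | nil =>
    intro checked cT cTh two three _ _ _
    simp [delta'_nil]
  | cons c rest ih =>
    intro checked cT cTh two three hchk h2 h3
    simp only [List.foldl_cons]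
    by_cases hm : checked.contains c
    · have hcmem : c ∈ checked := by simpa using hm
      have hstep : parteoneStep s (checked, cT, cTh, two, three) c
          = (checked, cT, cTh, two, three) := by
        simp [parteoneStep, hcmem]
      rw [hstep]
      obtain ⟨i2, i3⟩ := ih checked cT cTh two three hchk h2 h3
      refine ⟨i2.trans ?_, i3.trans ?_⟩
      · cases cT with
        | true => simp
        | false =>
          have hne : s.toList.count c ≠ 2 := fun habs =>
            Bool.false_ne_true (h2.mpr ⟨c, hcmem, habs⟩)
          rw [delta'_cons_ne _ _ _ _ hne]
      · cases cTh with
        | true => simp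
        | false =>
          have hne : s.toList.count c ≠ 3 := fun habs =>
            Bool.false_ne_true (h3.mpr ⟨c, hcmem, habs⟩)
          rw [delta'_cons_ne _ _ _ _ hne]
    · have hnm : c ∉ checked := by simpa using hm
      by_cases hA : s.toList.count c = 2 ∧ cT = false
      · have hstep : parteoneStep s (checked, cT, cTh, two, three) c
            = (checked ++ [c], true, cTh, two + 1, three) := by
          simp [parteoneStep, hnm, chars_count_singleton, hA.1, hA.2]
        rw [hstep]
        have hchk' : ∀ x ∈ checked ++ [c],
            s.toList.count x = 2 ∨ s.toList.count x = 3 := by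
          intro x hx
          rcases List.mem_append.1 hx with hx' | hx'
          · exact hchk x hx'
          · simp at hx'; subst hx'; exact Or.inl hA.1
        have h2' : (true : Bool) = true ↔ ∃ x ∈ checked ++ [c], s.toList.count x = 2 := by
          simp only [true_iff]
          exact ⟨c, by simp, hA.1⟩
        have h3' : cTh = true ↔ ∃ x ∈ checked ++ [c], s.toList.count x = 3 := by
          rw [h3]
          constructor
          · rintro ⟨x, hx, hxc⟩; exact ⟨x, List.mem_append_left _ hx, hxc⟩
          · rintro ⟨x, hx, hxc⟩
            rcases List.mem_append.1 hx with hx' | hx'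
            · exact ⟨x, hx', hxc⟩
            · simp at hx'; subst hx'; rw [hA.1] at hxc; simp at hxc
        obtain ⟨i2, i3⟩ := ih (checked ++ [c]) true cTh (two + 1) three hchk' h2' h3'
        refine ⟨i2.trans ?_, i3.trans ?_⟩
        · rw [hA.2, delta'_cons_eq _ _ _ _ hA.1]
          simp
        · cases cTh with
          | true => simp
          | false =>
            have hne : s.toList.count c ≠ 3 := by rw [hA.1]; simp
            rw [delta'_cons_ne _ _ _ _ hne]
      · by_cases hB : s.toList.count c = 3 ∧ cTh = false
        · have hstep : parteoneStep s (checked, cT, cTh, two, three) c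
              = (checked ++ [c], cT, true, two, three + 1) := by
            simp only [parteoneStep]
            simp [hnm, chars_count_singleton, hB.1, hB.2]
          rw [hstep]
          have hchk' : ∀ x ∈ checked ++ [c],
              s.toList.count x = 2 ∨ s.toList.count x = 3 := by
            intro x hx
            rcases List.mem_append.1 hx with hx' | hx'
            · exact hchk x hx'
            · simp at hx'; subst hx'; exact Or.inr hB.1
          have h2' : cT = true ↔ ∃ x ∈ checked ++ [c], s.toList.count x = 2 := by
            rw [h2]
            constructor
            · rintro ⟨x, hx, hxc⟩; exact ⟨x, List.mem_append_left _ hx, hxc⟩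
            · rintro ⟨x, hx, hxc⟩
              rcases List.mem_append.1 hx with hx' | hx'
              · exact ⟨x, hx', hxc⟩
              · simp at hx'; subst hx'; rw [hB.1] at hxc; simp at hxc
          have h3' : (true : Bool) = true ↔ ∃ x ∈ checked ++ [c], s.toList.count x = 3 := by
            simp only [true_iff]
            exact ⟨c, by simp, hB.1⟩
          obtain ⟨i2, i3⟩ := ih (checked ++ [c]) cT true two (three + 1) hchk' h2' h3'
          refine ⟨i2.trans ?_, i3.trans ?_⟩
          · cases cT with
            | true => simp
            | false =>
              have hne : s.toList.count c ≠ 2 := by rw [hB.1]; simp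
              rw [delta'_cons_ne _ _ _ _ hne]
          · rw [hB.2, delta'_cons_eq _ _ _ _ hB.1]
            simp
        · have hstep : parteoneStep s (checked, cT, cTh, two, three) c
              = (checked, cT, cTh, two, three) := by
            simp only [parteoneStep]
            simp [hnm, chars_count_singleton, hA, hB]
          rw [hstep]
          obtain ⟨i2, i3⟩ := ih checked cT cTh two three hchk h2 h3
          refine ⟨i2.trans ?_, i3.trans ?_⟩
          · cases cT with
            | true => simp
            | false =>
              have hne : s.toList.count c ≠ 2 := fun habs => hA ⟨habs, rfl⟩
              rw [delta'_cons_ne _ _ _ _ hne]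
          · cases cTh with
            | true => simp
            | false =>
              have hne : s.toList.count c ≠ 3 := fun habs => hB ⟨habs, rfl⟩
              rw [delta'_cons_ne _ _ _ _ hne]

-- runs of a sorted list are exactly the multiplicities of its elements
theorem mem_runLengths_sorted (n : Nat) (hn : n ≠ 0) :
    ∀ (l : List Char), l.Pairwise (· ≤ ·) →
      (n ∈ runLengths l ↔ ∃ c ∈ l, l.count c = n) := by
  intro l
  induction l using runLengths.induct with
  | case1 =>
    intro _
    simp [runLengths]
  | case2 c rest ih =>
    intro hp
    have hrest : rest.Pairwise (· ≤ ·) := (List.pairwise_cons.1 hp).2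
    have hcle : ∀ x ∈ rest, c ≤ x := (List.pairwise_cons.1 hp).1
    have hsplit : rest = rest.takeWhile (· == c) ++ rest.dropWhile (· == c) :=
      (List.takeWhile_append_dropWhile).symm
    have ht1 : ∀ x ∈ rest.takeWhile (· == c), x = c := by
      intro x hx
      have := List.mem_takeWhile_imp hx
      simpa using this
    have ht2sorted : (rest.dropWhile (· == c)).Pairwise (· ≤ ·) :=
      hrest.sublist (List.dropWhile_sublist _)
    have hct2 : ∀ x ∈ rest.dropWhile (· == c), x ≠ c := by
      intro x hx
      match hdw : rest.dropWhile (· == c) with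
      | [] => rw [hdw] at hx; simp at hx
      | h :: tt =>
        have hh : ¬ (h == c) = true := by
          have := List.head_dropWhile_not (· == c) (l := rest) (by rw [hdw]; simp)
          simp only [hdw, List.head_cons] at this
          simp [this]
        have hhne : h ≠ c := by simpa using hh
        rw [hdw] at hx
        rcases List.mem_cons.1 hx with rfl | hx'
        · exact hhne
        · have hhx : h ≤ x := by
            have := List.pairwise_cons.1 (hdw ▸ ht2sorted)
            exact this.1 x hx'
          have hch : c ≤ h := by
            have hhrest : h ∈ rest := by
              have : h ∈ rest.dropWhile (· == c) := by rw [hdw]; simp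
              exact List.dropWhile_sublist _ |>.mem this
            exact hcle h hhrest
          have : c < x := lt_of_lt_of_le (lt_of_le_of_ne hch (Ne.symm hhne)) hhx
          exact fun habs => absurd habs.symm (ne_of_lt this)
    have hcount1 : (rest.takeWhile (· == c)).count c = (rest.takeWhile (· == c)).length := by
      rw [List.count_eq_length]
      intro b hb
      exact (ht1 b hb).symm
    have hcount0 : (rest.dropWhile (· == c)).count c = 0 :=
      List.count_eq_zero.2 (fun habs => hct2 c habs rfl)
    have hcountc : (c :: rest).count c = 1 + (rest.takeWhile (· == c)).length := by
      rw [List.count_cons_self]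
      conv_lhs => rw [hsplit]
      rw [List.count_append, hcount1, hcount0]
      omega
    have hrw : runLengths (c :: rest)
        = (1 + (rest.takeWhile (· == c)).length) :: runLengths (rest.dropWhile (· == c)) := by
      rw [runLengths]
    rw [hrw]
    constructor
    · intro hmem
      rcases List.mem_cons.1 hmem with rfl | hmem'
      · exact ⟨c, List.mem_cons_self, hcountc⟩
      · obtain ⟨x, hx, hxc⟩ := (ih ht2sorted).1 hmem'
        have hxne : x ≠ c := hct2 x hx
        have hxrest : x ∈ rest := (List.dropWhile_sublist _).mem hx
        refine ⟨x, List.mem_cons_of_mem _ hxrest, ?_⟩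
        rw [List.count_cons_of_ne hxne.symm]
        conv_lhs => rw [hsplit]
        rw [List.count_append]
        have : (rest.takeWhile (· == c)).count x = 0 := by
          rw [List.count_eq_zero]
          intro habs
          exact hxne (ht1 x habs)
        rw [this, hxc]
        omega
    · rintro ⟨x, hx, hxc⟩
      by_cases hxeq : x = c
      · subst hxeq
        rw [hcountc] at hxc
        exact List.mem_cons.2 (Or.inl hxc.symm)
      · rcases List.mem_cons.1 hx with rfl | hxrest
        · exact absurd rfl hxeq
        have hxt2 : x ∈ rest.dropWhile (· == c) := by
          rw [hsplit] at hxrest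
          rcases List.mem_append.1 hxrest with h' | h'
          · exact absurd (ht1 x h') hxeq
          · exact h'
        have : (rest.dropWhile (· == c)).count x = n := by
          rw [List.count_cons_of_ne (Ne.symm hxeq)] at hxc
          conv_lhs at hxc => rw [hsplit]
          rw [List.count_append] at hxc
          have h0 : (rest.takeWhile (· == c)).count x = 0 := by
            rw [List.count_eq_zero]
            intro habs
            exact hxeq (ht1 x habs)
          rw [h0] at hxc
          simpa using hxc
        exact List.mem_cons_of_mem _ ((ih ht2sorted).2 ⟨x, hxt2, this⟩)

theorem flags_fold (runs : List Nat) :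
    ∀ (f : Bool × Bool),
      runs.foldl (fun (f : Bool × Bool) run =>
        if run = 2 then (true, f.2) else if run = 3 then (f.1, true) else f) f
      = (f.1 || decide (2 ∈ runs), f.2 || decide (3 ∈ runs)) := by
  induction runs with
  | nil => intro f; simp
  | cons r rest ih =>
    intro f
    by_cases h2 : r = 2
    · subst h2
      rw [List.foldl_cons, if_pos rfl, ih]
      simp
    · by_cases h3 : r = 3
      · subst h3
        rw [List.foldl_cons, if_neg (by decide), if_pos rfl, ih]
        simp
      · rw [List.foldl_cons, if_neg h2, if_neg h3, ih]
        simp [List.mem_cons, Ne.symm h2, Ne.symm h3]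

-- per-string equality of the two outer-loop bodies, then fold them together
theorem fold_eq (data : List String) :
    ∀ (acc : Int × Int),
      data.foldl (fun (acc : Int × Int) s =>
        let r := s.toList.foldl (parteoneStep s) ([], false, false, acc.1, acc.2)
        (r.2.2.2.1, r.2.2.2.2)) acc
      = data.foldl (fun (acc : Int × Int) s =>
        let chars := PySem.List.sorted s.toList (fun x => x) false
        let flags := (runLengths chars).foldl
          (fun (f : Bool × Bool) run =>
            if run = 2 then (true, f.2) else if run = 3 then (f.1, true) else f)
          (false, false)
        ((if flags.1 then acc.1 + 1 else acc.1), (if flags.2 then acc.2 + 1 else acc.2))) acc := by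
  induction data with
  | nil => intro acc; rfl
  | cons s rest ih =>
    intro acc
    rw [List.foldl_cons, List.foldl_cons, ih]
    congr 1
    -- A's body on s
    obtain ⟨i2, i3⟩ := partone_inner s s.toList [] false false acc.1 acc.2
      (by simp) (by simp) (by simp)
    -- B's body on s
    have hperm : (PySem.List.sorted s.toList (fun x => x) false).Perm s.toList :=
      PySem.List.sorted_perm ..
    have hpair : (PySem.List.sorted s.toList (fun x => x) false).Pairwise (· ≤ ·) :=
      PySem.List.sorted_pairwise s.toList (fun x => x)
    have hmem : ∀ n : Nat, n ≠ 0 →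
        ((n ∈ runLengths (PySem.List.sorted s.toList (fun x => x) false))
          ↔ ∃ c ∈ s.toList, s.toList.count c = n) := by
      intro n hn
      rw [mem_runLengths_sorted n hn _ hpair]
      constructor
      · rintro ⟨x, hx, hxc⟩
        exact ⟨x, hperm.mem_iff.1 hx, by rw [← hperm.count_eq]; exact hxc⟩
      · rintro ⟨x, hx, hxc⟩
        exact ⟨x, hperm.mem_iff.2 hx, by rw [hperm.count_eq]; exact hxc⟩
    dsimp only
    rw [flags_fold]
    simp only [Bool.false_or]
    have e2 : (if decide (2 ∈ runLengths (PySem.List.sorted s.toList (fun x => x) false))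
        then acc.1 + 1 else acc.1) = acc.1 + delta' s.toList s.toList 2 := by
      by_cases h : ∃ c ∈ s.toList, s.toList.count c = 2
      · rw [if_pos (by rw [decide_eq_true_iff, hmem 2 (by decide)]; exact h)]
        simp [delta', h]
      · rw [if_neg (by rw [decide_eq_true_iff, hmem 2 (by decide)]; exact h)]
        simp [delta', h]
    have e3 : (if decide (3 ∈ runLengths (PySem.List.sorted s.toList (fun x => x) false))
        then acc.2 + 1 else acc.2) = acc.2 + delta' s.toList s.toList 3 := by
      by_cases h : ∃ c ∈ s.toList, s.toList.count c = 3
      · rw [if_pos (by rw [decide_eq_true_iff, hmem 3 (by decide)]; exact h)]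
        simp [delta', h]
      · rw [if_neg (by rw [decide_eq_true_iff, hmem 3 (by decide)]; exact h)]
        simp [delta', h]
    rw [e2, e3, i2, i3]
    simp

-- ===== VERDICT (by name: the statement is the Claim_ definition above) =====
theorem partone_spec : Claim_equal_partone := by
  intro data _
  unfold Spec_partone partone partone_alt
  rw [fold_eq]
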